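-- pv_equiv track=rewrite | github.com/NightVovy/npa | test/test4_npamatrix/function1/matrixtest.py | create_upper_triangle_matrix
-- ===== SOURCE A (Python) =====
-- def process_string(s):
--     # 第一个循环: 处理字符串中的 'I'
--     if all(c == 'I' for c in s):
--         return 'I'
--     else:
--         s = s.replace('I', '')  # 删除所有的 'I'
--
--     # 第二个循环: 筛选偶数个的元素
--     segments = ['I', 'A0', 'A1', 'B0', 'B1']
--     counter = {segment: 0 for segment in segments}
--
--     for segment in segments:
--         counter[segment] = s.count(segment)
--
--     new_str = []
--     for segment in segments:
--         count = counter[segment]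
--         if count % 2 != 0:
--             new_str.append(segment * (count % 2))  # 保留出现奇数次的段
--
--     # 如果所有段都被删除，最终字符串设为 'I'
--     final_str = ''.join(new_str)
--     if not final_str:
--         final_str = 'I'
--
--     return final_str
--
-- def create_upper_triangle_matrix(S):
--     # 将字符串集合转换为列表，方便索引
--     S_list = list(S)
--     n = len(S_list)
--
--     # 初始化一个 n x n 的矩阵，值为 None
--     matrix = [[None] * n for _ in range(n)]
--
--     # 遍历每个字符串集合，按照规则拼接并填充矩阵
--     for i in range(n):
--         for j in range(i, n):  # 只处理上三角部分，包括对角线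
--             if i == j:
--                 matrix[i][j] = S_list[i] + S_list[i]  # 自己和自己拼接
--             else:
--                 matrix[i][j] = S_list[j] + S_list[i]  # 拼接第二个字符串在前，第一个字符串在后
--
--             # 整理拼接后的新字符串
--             matrix[i][j] = process_string(matrix[i][j])
--
--     return matrix
-- ===== SOURCE B (Python) =====
-- def create_upper_triangle_matrix(S):
--     # Precompute per string: 'I'-stripped first/last char and non-overlapping
--     # pair-pattern counts; each cell is then combined in O(1) from the two
--     # signatures (counts add, plus one possible boundary occurrence).
--     S_list = list(S)
--     n = len(S_list)
--     pats = [('A', '0'), ('A', '1'), ('B', '0'), ('B', '1')]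
--     sigs = []
--     for s in S_list:
--         t = [c for c in s if c != 'I']
--         counts = []
--         for a, b in pats:
--             counts.append(sum(1 for u, v in zip(t, t[1:]) if u == a and v == b))
--         first = t[0] if t else None
--         last = t[-1] if t else None
--         sigs.append((first, last, counts))
--
--     def combine(sj, si):
--         fj, lj, cj = sj
--         fi, li, ci = si
--         if fj is None and fi is None:
--             return 'I'
--         parts = []
--         for k, (a, b) in enumerate(pats):
--             bnd = 1 if (lj == a and fi == b) else 0
--             if (cj[k] + ci[k] + bnd) % 2 == 1:
--                 parts.append(a + b)
--         r = ''.join(parts)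
--         return r if r else 'I'
--
--     return [[combine(sigs[j], sigs[i]) if j >= i else None for j in range(n)]
--             for i in range(n)]
-- ===== Notes on version B (the rewrite author's own statement) =====
-- stated objective: alternative
-- what changed: Instead of building and rescanning each concatenated string per cell, B precomputes one signature per input string (I-stripped first/last char and non-overlapping two-char pattern counts) and combines two signatures per cell via count parity plus a boundary-pair check.
import Mathlib
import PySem

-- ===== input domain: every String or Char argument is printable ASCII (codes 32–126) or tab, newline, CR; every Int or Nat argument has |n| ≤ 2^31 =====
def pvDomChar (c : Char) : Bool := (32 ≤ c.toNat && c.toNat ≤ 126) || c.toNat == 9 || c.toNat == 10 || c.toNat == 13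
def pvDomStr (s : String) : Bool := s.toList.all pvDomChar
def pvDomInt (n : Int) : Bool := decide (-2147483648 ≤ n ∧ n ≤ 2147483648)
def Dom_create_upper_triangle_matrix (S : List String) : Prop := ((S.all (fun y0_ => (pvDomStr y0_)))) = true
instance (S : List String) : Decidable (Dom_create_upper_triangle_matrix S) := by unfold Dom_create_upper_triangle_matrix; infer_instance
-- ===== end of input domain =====

-- B combines per-string precomputed signatures (I-stripped first/last char +
-- pair-pattern counts) per cell instead of rescanning each concatenated string.
-- ===== PORT A =====
-- Port of A; strings are handled as their code-point lists (String.ofList/toList at the edges).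
-- 'seg * n' : exact (Python yields '' for n <= 0, List.replicate n.toNat does too)
def pvRepeatA (seg : List Char) (n : Int) : List Char := (List.replicate n.toNat seg).flatten

def processStringA (s : List Char) : List Char :=
  if s.all (fun c => c == 'I') then ['I']
  else
    let s := PySem.Chars.replace s ['I'] []
    let segments : List (List Char) := [['I'], ['A','0'], ['A','1'], ['B','0'], ['B','1']]
    let counter : PySem.Dict (List Char) Int :=
      segments.foldl (fun d seg => d.insert seg 0) PySem.Dict.empty
    let counter : PySem.Dict (List Char) Int :=
      segments.foldl (fun d seg => d.insert seg ((PySem.Chars.count s seg : Int))) counter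
    let new_str : List (List Char) :=
      segments.foldl (fun acc seg =>
        let count := counter.getD seg 0
        if PySem.Int.mod count 2 ≠ 0 then acc ++ [pvRepeatA seg (PySem.Int.mod count 2)]
        else acc) []
    let final_str := PySem.Chars.join [] new_str
    if final_str.isEmpty then ['I'] else final_str

def create_upper_triangle_matrix (S : List String) : List (List (Option String)) :=
  let S_list : List (List Char) := S.map String.toList
  let n := S_list.length
  let matrix : List (List (Option String)) := List.replicate n (List.replicate n none)
  -- for i in range(n): for j in range(i, n): matrix[i][j] = process_string(...)
  (List.range n).foldl (fun m i =>
    (List.range' i (n - i)).foldl (fun m j =>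
      let cat : List Char :=
        if i = j then S_list.getD i [] ++ S_list.getD i []
        else S_list.getD j [] ++ S_list.getD i []
      m.set i ((m.getD i []).set j (some (String.ofList (processStringA cat))))) m) matrix

-- ===== PORT B =====
def pvStrip (s : List Char) : List Char := s.filter (fun c => !(c == 'I'))

def pvPats : List (Char × Char) := [('A','0'), ('A','1'), ('B','0'), ('B','1')]

-- signature: (first, last, pair-pattern counts) of the 'I'-stripped string
def pvSig (s : List Char) : Option Char × Option Char × List Nat :=
  let t := pvStrip s
  (t.head?, t.getLast?,
   pvPats.map (fun p => (t.zip (t.drop 1)).countP (fun uv => uv.1 == p.1 && uv.2 == p.2)))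

def pvCombine (sj si : Option Char × Option Char × List Nat) : List Char :=
  if sj.1 = none ∧ si.1 = none then ['I']
  else
    let parts : List (List Char) :=
      (PySem.List.enumerate pvPats).foldl (fun acc kp =>
        let bnd : Nat := if sj.2.1 = some kp.2.1 ∧ si.1 = some kp.2.2 then 1 else 0
        if (sj.2.2.getD kp.1.toNat 0 + si.2.2.getD kp.1.toNat 0 + bnd) % 2 == 1 then
          acc ++ [[kp.2.1, kp.2.2]]
        else acc) []
    let r := PySem.Chars.join [] parts
    if r.isEmpty then ['I'] else r

def create_upper_triangle_matrix_alt (S : List String) : List (List (Option String)) :=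
  let S_list : List (List Char) := S.map String.toList
  let n := S_list.length
  let sigs := S_list.map pvSig
  (List.range n).map (fun i =>
    (List.range n).map (fun j =>
      if i ≤ j then some (String.ofList (pvCombine (sigs.getD j (none, none, []))
                                               (sigs.getD i (none, none, []))))
      else none))

-- ===== PRECONDITION & SPEC =====
def Spec_create_upper_triangle_matrix (S : List String) (out : List (List (Option String))) : Prop := out = create_upper_triangle_matrix_alt S
instance (S : List String) (out : List (List (Option String))) : Decidable (Spec_create_upper_triangle_matrix S out) := by unfold Spec_create_upper_triangle_matrix; infer_instance

-- ===== CLAIM (what is proved, stated in full; the proofs are below) =====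
def Claim_equal_create_upper_triangle_matrix : Prop := ∀ (S : List String), Dom_create_upper_triangle_matrix S → Spec_create_upper_triangle_matrix S (create_upper_triangle_matrix S)

-- ===== LEMMAS AND PROOFS =====
def pairCount (a b : Char) : List Char → Nat
  | [] => 0
  | [_] => 0
  | x :: y :: t => (if x = a ∧ y = b then 1 else 0) + pairCount a b (y :: t)

theorem pairCount_cons_of_ne (a b x : Char) (t : List Char) (hx : x ≠ a) :
    pairCount a b (x :: t) = pairCount a b t := by
  cases t with
  | nil => rfl
  | cons y t => simp [pairCount, hx]

theorem count_go_pair (a b : Char) (hab : a ≠ b) :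
    ∀ (fuel : Nat) (l : List Char) (acc : Nat), l.length ≤ fuel →
    PySem.Chars.count.go [a, b] fuel l acc = acc + pairCount a b l := by
  intro fuel
  induction fuel with
  | zero => intro l acc h; simp at h; simp [h, PySem.Chars.count.go, pairCount]
  | succ f ih =>
    intro l acc h
    cases l with
    | nil => simp [PySem.Chars.count.go, pairCount]
    | cons x t =>
      simp only [PySem.Chars.count.go]
      by_cases hpre : [a, b].isPrefixOf (x :: t) = true
      · rw [if_pos hpre]
        cases t with
        | nil => simp [List.isPrefixOf] at hpre
        | cons y t' =>
          simp [List.isPrefixOf] at hpre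
          obtain ⟨hx, hy⟩ := hpre
          subst hx; subst hy
          simp only [List.length_cons] at h
          rw [show List.drop [a, b].length (a :: b :: t') = t' from rfl]
          rw [ih _ _ (by omega)]
          have hpc : pairCount a b (b :: t') = pairCount a b t' :=
            pairCount_cons_of_ne a b b t' (Ne.symm hab)
          simp [pairCount, hpc]; omega
      · rw [if_neg hpre]
        simp only [List.length_cons] at h
        rw [ih _ _ (by omega)]
        cases t with
        | nil => simp [pairCount]
        | cons y t' =>
          simp [List.isPrefixOf] at hpre
          simp only [pairCount]
          rw [if_neg (by rintro ⟨h1, h2⟩; exact hpre h1.symm h2.symm)]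
          omega

theorem count_pair (a b : Char) (hab : a ≠ b) (s : List Char) :
    PySem.Chars.count s [a, b] = pairCount a b s := by
  simpa [PySem.Chars.count] using count_go_pair a b hab s.length s 0 le_rfl

theorem count_single_zero (c : Char) (s : List Char) (hc : c ∉ s) :
    PySem.Chars.count s [c] = 0 := by
  have go0 : ∀ (fuel : Nat) (l : List Char) (acc : Nat), l.length ≤ fuel → c ∉ l →
      PySem.Chars.count.go [c] fuel l acc = acc := by
    intro fuel
    induction fuel with
    | zero => intro l acc h _; simp at h; simp [PySem.Chars.count.go]
    | succ f ih =>
      intro l acc h hm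
      cases l with
      | nil => simp [PySem.Chars.count.go]
      | cons x t =>
        simp only [PySem.Chars.count.go]
        rw [if_neg (by simp [List.isPrefixOf]; intro hxc; exact absurd hxc.symm (by simp at hm; exact fun e => hm.1 e.symm))]
        simp only [List.length_cons] at h
        exact ih t acc (by omega) (by simp at hm; exact hm.2)
  simp [PySem.Chars.count, go0 s.length s 0 le_rfl hc]

theorem pairCount_append (a b : Char) (u v : List Char) :
    pairCount a b (u ++ v)
      = pairCount a b u + pairCount a b v
        + (if u.getLast? = some a ∧ v.head? = some b then 1 else 0) := by
  induction u with
  | nil => simp [pairCount]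
  | cons x u ih =>
    cases u with
    | nil =>
      cases v with
      | nil => simp [pairCount]
      | cons y t => simp [pairCount]; omega
    | cons y u' =>
      simp only [List.cons_append, pairCount]
      rw [show (y :: u') ++ v = (y :: u') ++ v from rfl] at ih
      simp only [List.cons_append] at ih
      rw [ih]
      simp [List.getLast?_cons_cons]
      omega

theorem pairCount_eq_countP (a b : Char) (t : List Char) :
    (t.zip (t.drop 1)).countP (fun uv => uv.1 == a && uv.2 == b) = pairCount a b t := by
  induction t with
  | nil => rfl
  | cons x t ih =>
    cases t with
    | nil => rfl
    | cons y t' =>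
      simp only [List.drop_one, List.tail_cons, List.zip_cons_cons, List.countP_cons, pairCount]
      rw [← ih]
      simp only [List.drop_one, List.tail_cons]
      by_cases hxy : x = a ∧ y = b
      · simp [hxy]; omega
      · rw [if_neg hxy]
        have : ¬(x == a && y == b) = true := by
          simp only [Bool.and_eq_true, beq_iff_eq]; exact hxy
        simp [this]

theorem replace_go_filter (l : List Char) (fuel : Nat) (acc : List Char)
    (h : l.length ≤ fuel) :
    PySem.Chars.replace.go ['I'] [] fuel l acc
      = acc.reverse ++ l.filter (fun c => !(c == 'I')) := by
  induction fuel generalizing l acc with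
  | zero => simp at h; simp [h, PySem.Chars.replace.go]
  | succ f ih =>
    cases l with
    | nil => simp [PySem.Chars.replace.go]
    | cons c t =>
      simp only [PySem.Chars.replace.go, List.isPrefixOf, Bool.and_true]
      by_cases hc : c = 'I'
      · subst hc
        rw [if_pos (by simp)]
        simp only [List.length_cons] at h
        rw [ih _ _ (by simp; omega)]
        simp
      · rw [if_neg (by simp; exact fun e => hc e.symm)]
        simp only [List.length_cons] at h
        rw [ih _ _ (by omega)]
        simp [hc]

theorem replace_eq_filter (s : List Char) :
    PySem.Chars.replace s ['I'] [] = s.filter (fun c => !(c == 'I')) := by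
  simp [PySem.Chars.replace, replace_go_filter s s.length [] le_rfl]

theorem strip_empty_iff (s : List Char) :
    pvStrip s = [] ↔ s.all (fun c => c == 'I') = true := by
  simp [pvStrip, List.filter_eq_nil_iff, List.all_eq_true]

theorem intcond (p q : Nat) (c : Prop) [Decidable c] :
    (((p : Int) + (q : Int) + (if c then 1 else 0)) % 2 = 1)
      ↔ ((p + q + (if c then 1 else 0)) % 2 = 1) := by
  split_ifs <;> omega

theorem repval (seg : List Char) (p q : Nat) (c : Prop) [Decidable c]
    (h : (p + q + (if c then 1 else 0)) % 2 = 1) :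
    pvRepeatA seg (((p : Int) + (q : Int) + (if c then 1 else 0)) % 2) = seg := by
  have h2 : ((p : Int) + (q : Int) + (if c then 1 else 0)) % 2 = 1 := by
    split_ifs at * <;> omega
  rw [h2]; simp [pvRepeatA]

theorem cell_eq (x y : List Char) :
    processStringA (x ++ y) = pvCombine (pvSig x) (pvSig y) := by
  have hsig : ∀ s : List Char, pvSig s =
      ((pvStrip s).head?, (pvStrip s).getLast?,
       pvPats.map (fun p => pairCount p.1 p.2 (pvStrip s))) := by
    intro s
    simp only [pvSig, pvPats, List.map]
    refine congrArg _ (congrArg _ ?_)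
    refine congrArg₂ _ ?_ (congrArg₂ _ ?_ (congrArg₂ _ ?_ (congrArg₂ _ ?_ rfl))) <;>
      exact pairCount_eq_countP _ _ _
  by_cases hall : (x ++ y).all (fun c => c == 'I') = true
  · have hx : pvStrip x = [] := by
      rw [strip_empty_iff]; simp [List.all_append] at hall; simp [List.all_eq_true]; exact hall.1
    have hy : pvStrip y = [] := by
      rw [strip_empty_iff]; simp [List.all_append] at hall; simp [List.all_eq_true]; exact hall.2
    simp [processStringA, hall, pvCombine, hsig, hx, hy]
  · have hne : ¬(pvStrip x = [] ∧ pvStrip y = []) := by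
      rw [strip_empty_iff, strip_empty_iff]
      intro ⟨h1, h2⟩; exact hall (by simp [List.all_append, List.all_eq_true] at *; exact ⟨h1, h2⟩)
    have hstrip : PySem.Chars.replace (x ++ y) ['I'] [] = pvStrip x ++ pvStrip y := by
      rw [replace_eq_filter]; simp [pvStrip, List.filter_append]
    have hI : PySem.Chars.count (pvStrip x ++ pvStrip y) ['I'] = 0 := by
      apply count_single_zero
      simp [pvStrip, List.mem_filter]
    have hcnt : ∀ a b : Char, a ≠ b →
        PySem.Chars.count (pvStrip x ++ pvStrip y) [a, b]
          = pairCount a b (pvStrip x) + pairCount a b (pvStrip y)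
            + (if (pvStrip x).getLast? = some a ∧ (pvStrip y).head? = some b then 1 else 0) := by
      intro a b hab
      rw [count_pair a b hab, pairCount_append]
    have hBc : ¬((pvStrip x).head? = none ∧ (pvStrip y).head? = none) := by
      simpa [List.head?_eq_none_iff] using hne
    rw [hsig, hsig]
    simp only [processStringA, pvCombine]
    rw [if_neg hall, if_neg hBc]
    simp only [hstrip, List.foldl]
    simp only [PySem.Dict.getD_insert]
    norm_num
    rw [hcnt 'A' '0' (by decide), hcnt 'A' '1' (by decide),
        hcnt 'B' '0' (by decide), hcnt 'B' '1' (by decide), hI]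
    simp only [show (('0':Char) = '1') = False from by simp,
               show (('A':Char) = 'B') = False from by simp,
               show (('1':Char) = '0') = False from by simp,
               if_false, and_false]
    have henum : PySem.List.enumerate pvPats
        = [((0:Int),('A','0')), (1,('A','1')), (2,('B','0')), (3,('B','1'))] := by decide
    rw [henum]
    norm_num [List.foldl, pvPats]
    simp only [intcond]
    by_cases h1 : (pairCount 'A' '0' (pvStrip x) + pairCount 'A' '0' (pvStrip y) +
        if (pvStrip x).getLast? = some 'A' ∧ (pvStrip y).head? = some '0' then 1 else 0) % 2 = 1 <;>
    by_cases h2 : (pairCount 'A' '1' (pvStrip x) + pairCount 'A' '1' (pvStrip y) +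
        if (pvStrip x).getLast? = some 'A' ∧ (pvStrip y).head? = some '1' then 1 else 0) % 2 = 1 <;>
    by_cases h3 : (pairCount 'B' '0' (pvStrip x) + pairCount 'B' '0' (pvStrip y) +
        if (pvStrip x).getLast? = some 'B' ∧ (pvStrip y).head? = some '0' then 1 else 0) % 2 = 1 <;>
    by_cases h4 : (pairCount 'B' '1' (pvStrip x) + pairCount 'B' '1' (pvStrip y) +
        if (pvStrip x).getLast? = some 'B' ∧ (pvStrip y).head? = some '1' then 1 else 0) % 2 = 1 <;>
    simp [h1, h2, h3, h4, repval]

theorem set_self_getElem? {α : Type} (r : List α) (k : Nat) (v : α) :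
    (r.set k v)[k]? = r[k]?.map (fun _ => v) := by
  rw [List.getElem?_set, if_pos rfl]
  by_cases hl : k < r.length
  · simp [hl]
  · have h1 : r[k]? = none := List.getElem?_eq_none_iff.mpr (by omega)
    simp [h1]; omega

theorem foldl_set_getElem? {α : Type} (js : List Nat) (v : Nat → α) :
    ∀ (r : List α) (k : Nat),
    (js.foldl (fun r j => r.set j (v j)) r)[k]?
      = if k ∈ js then r[k]?.map (fun _ => v k) else r[k]? := by
  induction js with
  | nil => intro r k; simp
  | cons j js ih =>
    intro r k
    simp only [List.foldl_cons, ih, List.mem_cons]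
    by_cases hm : k ∈ js
    · simp only [hm, if_true, or_true]
      by_cases he : j = k
      · subst he
        rw [set_self_getElem?]
        cases r[j]? <;> simp
      · rw [List.getElem?_set, if_neg he]
    · simp only [hm, if_false]
      by_cases he : k = j
      · subst he
        simp only [true_or, if_true]
        exact set_self_getElem? r k (v k)
      · simp only [he, false_or, if_false]
        rw [List.getElem?_set, if_neg (fun h => he h.symm)]

theorem rowFill_eq (n i : Nat) (f : Nat → Option String) :
    (List.range' i (n - i)).foldl (fun r j => r.set j (f j)) (List.replicate n (none : Option String))
      = (List.range n).map (fun j => if i ≤ j then f j else none) := by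
  apply List.ext_getElem?
  intro k
  rw [foldl_set_getElem?]
  by_cases hk : k < n
  · have hrep : (List.replicate n (none : Option String))[k]? = some none := by
      simp [hk]
    have hmap : ((List.range n).map (fun j => if i ≤ j then f j else none))[k]?
        = some (if i ≤ k then f k else none) := by
      simp [List.getElem?_map, List.getElem?_range hk]
    rw [hmap, hrep]
    by_cases hik : i ≤ k
    · rw [if_pos (by rw [List.mem_range'_1]; omega), if_pos hik]; rfl
    · rw [if_neg (by rw [List.mem_range'_1]; omega), if_neg hik]
  · have hrep : (List.replicate n (none : Option String))[k]? = none := by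
      simp [hk]
    have hmap : ((List.range n).map (fun j => if i ≤ j then f j else none))[k]? = none := by
      rw [List.getElem?_eq_none_iff]; simp; omega
    rw [hmap, hrep]
    split_ifs <;> rfl

theorem set_getD_self (m : List (List (Option String))) (i : Nat) (hi : i < m.length) :
    m.set i (m.getD i []) = m := by
  apply List.ext_getElem?
  intro k
  rw [List.getElem?_set]
  by_cases he : i = k
  · subst he
    rw [if_pos rfl, if_pos hi, List.getD_eq_getElem?_getD, List.getElem?_eq_getElem hi]
    simp
  · rw [if_neg he]

theorem getD_set_self (m : List (List (Option String))) (i : Nat) (r : List (Option String))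
    (hi : i < m.length) : (m.set i r).getD i [] = r := by
  rw [List.getD_eq_getElem?_getD, List.getElem?_set, if_pos rfl, if_pos hi]
  rfl

theorem inner_factor (i : Nat) (F : Nat → Option String) (js : List Nat) :
    ∀ m : List (List (Option String)), i < m.length →
    js.foldl (fun m j => m.set i ((m.getD i []).set j (F j))) m
      = m.set i (js.foldl (fun r j => r.set j (F j)) (m.getD i [])) := by
  induction js with
  | nil => intro m hi; exact (set_getD_self m i hi).symm
  | cons j js ih =>
    intro m hi
    simp only [List.foldl_cons]
    rw [ih _ (by simp [List.length_set]; omega)]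
    rw [getD_set_self _ _ _ hi, List.set_set]

theorem outer_fold (n : Nat) (F : Nat → Nat → Option String) :
    ∀ (b a : Nat), a + b = n →
    (List.range' a b).foldl
        (fun m i => (List.range' i (n - i)).foldl
          (fun m j => m.set i ((m.getD i []).set j (F i j))) m)
        ((List.range n).map (fun i =>
          if i < a then (List.range n).map (fun j => if i ≤ j then F i j else none)
          else List.replicate n none))
      = (List.range n).map (fun i => (List.range n).map (fun j => if i ≤ j then F i j else none)) := by
  intro b
  induction b with
  | zero =>
    intro a ha
    apply List.map_congr_left
    intro i hi
    rw [if_pos (by simp at hi; omega)]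
  | succ b ih =>
    intro a ha
    have han : a < n := by omega
    rw [show List.range' a (b + 1) = a :: List.range' (a + 1) b by simp [List.range'_succ],
        List.foldl_cons]
    have hlen : ((List.range n).map (fun i =>
        if i < a then (List.range n).map (fun j => if i ≤ j then F i j else none)
        else List.replicate n none)).length = n := by simp
    rw [inner_factor _ _ _ _ (by rw [hlen]; exact han)]
    have hgetD : ((List.range n).map (fun i =>
        if i < a then (List.range n).map (fun j => if i ≤ j then F i j else none)
        else List.replicate n none)).getD a [] = List.replicate n none := by
      rw [List.getD_eq_getElem?_getD, List.getElem?_map, List.getElem?_range han]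
      simp
    rw [hgetD, rowFill_eq n a (F a)]
    have hset : ((List.range n).map (fun i =>
        if i < a then (List.range n).map (fun j => if i ≤ j then F i j else none)
        else List.replicate n none)).set a ((List.range n).map (fun j => if a ≤ j then F a j else none))
        = (List.range n).map (fun i =>
          if i < a + 1 then (List.range n).map (fun j => if i ≤ j then F i j else none)
          else List.replicate n none) := by
      apply List.ext_getElem?
      intro k
      rw [List.getElem?_set]
      by_cases hk : k < n
      · rw [List.getElem?_map, List.getElem?_map, List.getElem?_range hk]
        simp only [Option.map_some]
        by_cases hka : a = k
        · subst hka
          rw [if_pos rfl, if_pos (by simp; omega), if_pos (by omega)]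
        · rw [if_neg hka]
          congr 1
          by_cases h1 : k < a
          · rw [if_pos h1, if_pos (by omega)]
          · rw [if_neg h1, if_neg (by omega)]
      · have h1 : ∀ (l : List (List (Option String))), l.length = n → l[k]? = none := by
          intro l hl; rw [List.getElem?_eq_none_iff]; omega
        rw [if_neg (show a ≠ k by omega), h1 _ (by simp), h1 _ (by simp)]
    rw [hset]
    exact ih (a + 1) (by omega)


theorem getD_map_lt {α β : Type} (f : α → β) (l : List α) (k : Nat) (d : β) (d' : α)
    (hk : k < l.length) : (l.map f).getD k d = f (l.getD k d') := by
  rw [List.getD_eq_getElem?_getD, List.getElem?_map, List.getElem?_eq_getElem hk,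
      List.getD_eq_getElem?_getD, List.getElem?_eq_getElem hk]
  rfl

theorem matrix_fold_eq_map (n : Nat) (F : Nat → Nat → Option String) :
    (List.range n).foldl
        (fun m i => (List.range' i (n - i)).foldl
          (fun m j => m.set i ((m.getD i []).set j (F i j))) m)
        (List.replicate n (List.replicate n none))
      = (List.range n).map (fun i => (List.range n).map (fun j => if i ≤ j then F i j else none)) := by
  have h := outer_fold n F n 0 (by omega)
  rw [show (List.range' 0 n) = List.range n from (List.range_eq_range').symm] at h
  have h0 : ((List.range n).map (fun i =>
      if i < 0 then (List.range n).map (fun j => if i ≤ j then F i j else none)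
      else List.replicate n (none : Option String)))
      = List.replicate n (List.replicate n none) := by simp
  rw [h0] at h
  exact h

theorem main_eq (S : List String) :
    create_upper_triangle_matrix S = create_upper_triangle_matrix_alt S := by
  simp only [create_upper_triangle_matrix, create_upper_triangle_matrix_alt]
  rw [matrix_fold_eq_map (S.map String.toList).length]
  apply List.map_congr_left
  intro i hi
  apply List.map_congr_left
  intro j hj
  simp only [List.mem_range] at hi hj
  by_cases hij : i ≤ j
  · rw [if_pos hij, if_pos hij]
    congr 1
    congr 1
    rw [getD_map_lt pvSig _ j _ [] (by simpa using hj),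
        getD_map_lt pvSig _ i _ [] (by simpa using hi)]
    by_cases he : i = j
    · subst he
      rw [if_pos rfl]
      exact cell_eq _ _
    · rw [if_neg he]
      exact cell_eq _ _
  · rw [if_neg hij, if_neg hij]

-- ===== VERDICT (by name: the statement is the Claim_ definition above) =====
theorem create_upper_triangle_matrix_spec : Claim_equal_create_upper_triangle_matrix := by
  intro S _
  unfold Spec_create_upper_triangle_matrix
  exact main_eq S
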